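-- pv_equiv track=rewrite | github.com/harvard-edge/cs249r_book | tools/scripts/maintenance/generate_release_notes.py | analyze_commit_messages
-- ===== SOURCE A (Python) =====
-- def analyze_commit_messages(commits):
--     """Analyze commit messages for key themes"""
--     themes = {
--         'content': [],
--         'infrastructure': [],
--         'bugfixes': [],
--         'features': [],
--         'documentation': [],
--         'other': []
--     }
--
--     for commit in commits:
--         if not commit:
--             continue
--
--         msg = commit.split(' ', 1)[1] if ' ' in commit else commit
--
--         if any(keyword in msg.lower() for keyword in ['fix', 'bug', 'error', 'issue']):
--             themes['bugfixes'].append(commit)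
--         elif any(keyword in msg.lower() for keyword in ['feat', 'add', 'new', 'implement']):
--             themes['features'].append(commit)
--         elif any(keyword in msg.lower() for keyword in ['content', 'chapter', 'section']):
--             themes['content'].append(commit)
--         elif any(keyword in msg.lower() for keyword in ['workflow', 'ci', 'deploy', 'build']):
--             themes['infrastructure'].append(commit)
--         elif any(keyword in msg.lower() for keyword in ['doc', 'readme', 'guide']):
--             themes['documentation'].append(commit)
--         else:
--             themes['other'].append(commit)
--
--     return themes
-- ===== SOURCE B (Python) =====
-- # B: replaces A's mutated-dict if/elif cascade by a pure rule table: classify each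
-- # commit by first matching rule, then group with one filter pass per category.
-- RULES = [
--     ('bugfixes', ['fix', 'bug', 'error', 'issue']),
--     ('features', ['feat', 'add', 'new', 'implement']),
--     ('content', ['content', 'chapter', 'section']),
--     ('infrastructure', ['workflow', 'ci', 'deploy', 'build']),
--     ('documentation', ['doc', 'readme', 'guide']),
-- ]
--
-- KEY_ORDER = ['content', 'infrastructure', 'bugfixes', 'features', 'documentation', 'other']
--
-- def _category(commit):
--     msg = commit.split(' ', 1)[1] if ' ' in commit else commit
--     for cat, kws in RULES:
--         if any(k in msg.lower() for k in kws):
--             return cat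
--     return 'other'
--
-- def analyze_commit_messages(commits):
--     cats = [(c, _category(c)) for c in commits if c]
--     return {key: [c for c, k in cats if k == key] for key in KEY_ORDER}
-- ===== Notes on version B (the rewrite author's own statement) =====
-- stated objective: simpler
-- what changed: Replaces A's six-way if/elif cascade mutating a pre-built dict in one pass by a declarative ordered rule table with a first-match classify helper and one filter pass per category, built as a dict comprehension.
import Mathlib
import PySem

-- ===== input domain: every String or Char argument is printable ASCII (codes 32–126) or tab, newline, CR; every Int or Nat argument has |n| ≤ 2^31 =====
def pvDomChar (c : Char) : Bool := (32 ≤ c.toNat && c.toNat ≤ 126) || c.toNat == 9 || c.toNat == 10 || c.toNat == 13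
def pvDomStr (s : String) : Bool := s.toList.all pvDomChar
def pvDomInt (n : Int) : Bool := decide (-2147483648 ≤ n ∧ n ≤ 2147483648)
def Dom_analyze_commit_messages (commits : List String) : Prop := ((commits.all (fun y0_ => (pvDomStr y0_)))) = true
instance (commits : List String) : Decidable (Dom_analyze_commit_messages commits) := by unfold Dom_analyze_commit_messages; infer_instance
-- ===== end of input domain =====

-- B replaces A's mutated-dict if/elif cascade by a rule table, a classify helper and one filter pass per category (same output, a simpler pure decomposition; not faster).


-- ===== PORT A =====
-- msg = commit.split(' ', 1)[1] if ' ' in commit else commit  (this expression occurs verbatim in both Pythons; one shared helper)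
def pvMsgA (commit : String) : String :=
  if PySem.Str.isIn " " commit then
    PySem.List.pyGetD ((PySem.Str.splitMax? commit " " 1).getD []) 1 ""
  else commit

-- A's loop body, named so the fold function is a single symbol
def pvStepA (themes : PySem.Dict String (List String)) (commit : String) : PySem.Dict String (List String) :=
  if commit = "" then themes
  else
    let msg := pvMsgA commit
    if ["fix", "bug", "error", "issue"].any (fun kw => PySem.Str.isIn kw (PySem.Str.lower msg)) then
      themes.modify "bugfixes" [] (· ++ [commit])
    else if ["feat", "add", "new", "implement"].any (fun kw => PySem.Str.isIn kw (PySem.Str.lower msg)) then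
      themes.modify "features" [] (· ++ [commit])
    else if ["content", "chapter", "section"].any (fun kw => PySem.Str.isIn kw (PySem.Str.lower msg)) then
      themes.modify "content" [] (· ++ [commit])
    else if ["workflow", "ci", "deploy", "build"].any (fun kw => PySem.Str.isIn kw (PySem.Str.lower msg)) then
      themes.modify "infrastructure" [] (· ++ [commit])
    else if ["doc", "readme", "guide"].any (fun kw => PySem.Str.isIn kw (PySem.Str.lower msg)) then
      themes.modify "documentation" [] (· ++ [commit])
    else
      themes.modify "other" [] (· ++ [commit])

def analyze_commit_messages (commits : List String) : List (String × List String) :=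
  (commits.foldl pvStepA
    (PySem.Dict.ofList [("content", []), ("infrastructure", []), ("bugfixes", []),
                        ("features", []), ("documentation", []), ("other", [])])).items

-- ===== PORT B =====
def pvRules : List (String × List String) :=
  [("bugfixes", ["fix", "bug", "error", "issue"]),
   ("features", ["feat", "add", "new", "implement"]),
   ("content", ["content", "chapter", "section"]),
   ("infrastructure", ["workflow", "ci", "deploy", "build"]),
   ("documentation", ["doc", "readme", "guide"])]

def pvKeyOrder : List String :=
  ["content", "infrastructure", "bugfixes", "features", "documentation", "other"]

-- B's _category: first rule whose keyword list matches, else 'other'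
def pvCategory (commit : String) : String :=
  match pvRules.find? (fun r => r.2.any (fun kw => PySem.Str.isIn kw (PySem.Str.lower (pvMsgA commit)))) with
  | some r => r.1
  | none => "other"

def analyze_commit_messages_alt (commits : List String) : List (String × List String) :=
  let cats := (commits.filter (fun c => c ≠ "")).map (fun c => (c, pvCategory c))
  pvKeyOrder.map (fun key => (key, (cats.filter (fun p => p.2 == key)).map (fun p => p.1)))

-- ===== PRECONDITION & SPEC =====
def Spec_analyze_commit_messages (commits : List String) (out : List (String × List String)) : Prop := out = analyze_commit_messages_alt commits
instance (commits : List String) (out : List (String × List String)) : Decidable (Spec_analyze_commit_messages commits out) := by unfold Spec_analyze_commit_messages; infer_instance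

-- ===== CLAIM (what is proved, stated in full; the proofs are below) =====
def Claim_equal_analyze_commit_messages : Prop := ∀ (commits : List String), Dom_analyze_commit_messages commits → Spec_analyze_commit_messages commits (analyze_commit_messages commits)

-- ===== LEMMAS AND PROOFS =====
-- the six keys are fixed literals, so each Dict.modify step is definitional:

theorem pv_mod_content (l1 l2 l3 l4 l5 l6 : List String) (c : String) :
    (PySem.Dict.ofList [("content", l1), ("infrastructure", l2), ("bugfixes", l3), ("features", l4), ("documentation", l5), ("other", l6)]).modify "content" [] (· ++ [c])
    = PySem.Dict.ofList [("content", l1 ++ [c]), ("infrastructure", l2), ("bugfixes", l3), ("features", l4), ("documentation", l5), ("other", l6)] := rfl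

theorem pv_mod_infrastructure (l1 l2 l3 l4 l5 l6 : List String) (c : String) :
    (PySem.Dict.ofList [("content", l1), ("infrastructure", l2), ("bugfixes", l3), ("features", l4), ("documentation", l5), ("other", l6)]).modify "infrastructure" [] (· ++ [c])
    = PySem.Dict.ofList [("content", l1), ("infrastructure", l2 ++ [c]), ("bugfixes", l3), ("features", l4), ("documentation", l5), ("other", l6)] := rfl

theorem pv_mod_bugfixes (l1 l2 l3 l4 l5 l6 : List String) (c : String) :
    (PySem.Dict.ofList [("content", l1), ("infrastructure", l2), ("bugfixes", l3), ("features", l4), ("documentation", l5), ("other", l6)]).modify "bugfixes" [] (· ++ [c])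
    = PySem.Dict.ofList [("content", l1), ("infrastructure", l2), ("bugfixes", l3 ++ [c]), ("features", l4), ("documentation", l5), ("other", l6)] := rfl

theorem pv_mod_features (l1 l2 l3 l4 l5 l6 : List String) (c : String) :
    (PySem.Dict.ofList [("content", l1), ("infrastructure", l2), ("bugfixes", l3), ("features", l4), ("documentation", l5), ("other", l6)]).modify "features" [] (· ++ [c])
    = PySem.Dict.ofList [("content", l1), ("infrastructure", l2), ("bugfixes", l3), ("features", l4 ++ [c]), ("documentation", l5), ("other", l6)] := rfl

theorem pv_mod_documentation (l1 l2 l3 l4 l5 l6 : List String) (c : String) :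
    (PySem.Dict.ofList [("content", l1), ("infrastructure", l2), ("bugfixes", l3), ("features", l4), ("documentation", l5), ("other", l6)]).modify "documentation" [] (· ++ [c])
    = PySem.Dict.ofList [("content", l1), ("infrastructure", l2), ("bugfixes", l3), ("features", l4), ("documentation", l5 ++ [c]), ("other", l6)] := rfl

theorem pv_mod_other (l1 l2 l3 l4 l5 l6 : List String) (c : String) :
    (PySem.Dict.ofList [("content", l1), ("infrastructure", l2), ("bugfixes", l3), ("features", l4), ("documentation", l5), ("other", l6)]).modify "other" [] (· ++ [c])
    = PySem.Dict.ofList [("content", l1), ("infrastructure", l2), ("bugfixes", l3), ("features", l4), ("documentation", l5), ("other", l6 ++ [c])] := rfl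

-- the per-category bucket B builds
def pvBucket (key : String) (commits : List String) : List String :=
  commits.filter (fun c => c ≠ "" && pvCategory c == key)

-- loop invariant: A's fold over the six-key dict appends exactly B's buckets
theorem pv_main (commits : List String) (l1 l2 l3 l4 l5 l6 : List String) :
    (commits.foldl pvStepA (PySem.Dict.ofList [("content", l1), ("infrastructure", l2), ("bugfixes", l3), ("features", l4), ("documentation", l5), ("other", l6)])).items
    = [("content", l1 ++ pvBucket "content" commits), ("infrastructure", l2 ++ pvBucket "infrastructure" commits), ("bugfixes", l3 ++ pvBucket "bugfixes" commits), ("features", l4 ++ pvBucket "features" commits), ("documentation", l5 ++ pvBucket "documentation" commits), ("other", l6 ++ pvBucket "other" commits)] := by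
  induction commits generalizing l1 l2 l3 l4 l5 l6 with
  | nil => simp only [pvBucket, List.filter_nil, List.append_nil]; rfl
  | cons c rest ih =>
    rw [List.foldl_cons]
    by_cases hc : c = ""
    · have hs : pvStepA (PySem.Dict.ofList [("content", l1), ("infrastructure", l2), ("bugfixes", l3), ("features", l4), ("documentation", l5), ("other", l6)]) c = PySem.Dict.ofList [("content", l1), ("infrastructure", l2), ("bugfixes", l3), ("features", l4), ("documentation", l5), ("other", l6)] := by
        unfold pvStepA; rw [if_pos hc]
      rw [hs, ih]
      simp [pvBucket, hc]
    · by_cases b1 : (["fix", "bug", "error", "issue"].any (fun kw => PySem.Str.isIn kw (PySem.Str.lower (pvMsgA c)))) = true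
      · have hcat : pvCategory c = "bugfixes" := by
          unfold pvCategory pvRules
          rw [List.find?_cons_of_pos (by exact b1)]
        have hs : pvStepA (PySem.Dict.ofList [("content", l1), ("infrastructure", l2), ("bugfixes", l3), ("features", l4), ("documentation", l5), ("other", l6)]) c = PySem.Dict.ofList [("content", l1), ("infrastructure", l2), ("bugfixes", l3 ++ [c]), ("features", l4), ("documentation", l5), ("other", l6)] := by
          unfold pvStepA
          simp only [if_neg hc, b1, if_true]
          exact pv_mod_bugfixes l1 l2 l3 l4 l5 l6 c
        rw [hs, ih]
        simp [pvBucket, hc, hcat]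
      simp only [Bool.not_eq_true] at b1
      by_cases b2 : (["feat", "add", "new", "implement"].any (fun kw => PySem.Str.isIn kw (PySem.Str.lower (pvMsgA c)))) = true
      · have hcat : pvCategory c = "features" := by
          unfold pvCategory pvRules
          rw [List.find?_cons_of_neg (by simp only [b1]; exact Bool.false_ne_true), List.find?_cons_of_pos (by exact b2)]
        have hs : pvStepA (PySem.Dict.ofList [("content", l1), ("infrastructure", l2), ("bugfixes", l3), ("features", l4), ("documentation", l5), ("other", l6)]) c = PySem.Dict.ofList [("content", l1), ("infrastructure", l2), ("bugfixes", l3), ("features", l4 ++ [c]), ("documentation", l5), ("other", l6)] := by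
          unfold pvStepA
          simp only [if_neg hc, b1, Bool.false_eq_true, if_false, b2, if_true]
          exact pv_mod_features l1 l2 l3 l4 l5 l6 c
        rw [hs, ih]
        simp [pvBucket, hc, hcat]
      simp only [Bool.not_eq_true] at b2
      by_cases b3 : (["content", "chapter", "section"].any (fun kw => PySem.Str.isIn kw (PySem.Str.lower (pvMsgA c)))) = true
      · have hcat : pvCategory c = "content" := by
          unfold pvCategory pvRules
          rw [List.find?_cons_of_neg (by simp only [b1]; exact Bool.false_ne_true), List.find?_cons_of_neg (by simp only [b2]; exact Bool.false_ne_true), List.find?_cons_of_pos (by exact b3)]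
        have hs : pvStepA (PySem.Dict.ofList [("content", l1), ("infrastructure", l2), ("bugfixes", l3), ("features", l4), ("documentation", l5), ("other", l6)]) c = PySem.Dict.ofList [("content", l1 ++ [c]), ("infrastructure", l2), ("bugfixes", l3), ("features", l4), ("documentation", l5), ("other", l6)] := by
          unfold pvStepA
          simp only [if_neg hc, b1, b2, Bool.false_eq_true, if_false, b3, if_true]
          exact pv_mod_content l1 l2 l3 l4 l5 l6 c
        rw [hs, ih]
        simp [pvBucket, hc, hcat]
      simp only [Bool.not_eq_true] at b3
      by_cases b4 : (["workflow", "ci", "deploy", "build"].any (fun kw => PySem.Str.isIn kw (PySem.Str.lower (pvMsgA c)))) = true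
      · have hcat : pvCategory c = "infrastructure" := by
          unfold pvCategory pvRules
          rw [List.find?_cons_of_neg (by simp only [b1]; exact Bool.false_ne_true), List.find?_cons_of_neg (by simp only [b2]; exact Bool.false_ne_true), List.find?_cons_of_neg (by simp only [b3]; exact Bool.false_ne_true), List.find?_cons_of_pos (by exact b4)]
        have hs : pvStepA (PySem.Dict.ofList [("content", l1), ("infrastructure", l2), ("bugfixes", l3), ("features", l4), ("documentation", l5), ("other", l6)]) c = PySem.Dict.ofList [("content", l1), ("infrastructure", l2 ++ [c]), ("bugfixes", l3), ("features", l4), ("documentation", l5), ("other", l6)] := by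
          unfold pvStepA
          simp only [if_neg hc, b1, b2, b3, Bool.false_eq_true, if_false, b4, if_true]
          exact pv_mod_infrastructure l1 l2 l3 l4 l5 l6 c
        rw [hs, ih]
        simp [pvBucket, hc, hcat]
      simp only [Bool.not_eq_true] at b4
      by_cases b5 : (["doc", "readme", "guide"].any (fun kw => PySem.Str.isIn kw (PySem.Str.lower (pvMsgA c)))) = true
      · have hcat : pvCategory c = "documentation" := by
          unfold pvCategory pvRules
          rw [List.find?_cons_of_neg (by simp only [b1]; exact Bool.false_ne_true), List.find?_cons_of_neg (by simp only [b2]; exact Bool.false_ne_true), List.find?_cons_of_neg (by simp only [b3]; exact Bool.false_ne_true), List.find?_cons_of_neg (by simp only [b4]; exact Bool.false_ne_true), List.find?_cons_of_pos (by exact b5)]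
        have hs : pvStepA (PySem.Dict.ofList [("content", l1), ("infrastructure", l2), ("bugfixes", l3), ("features", l4), ("documentation", l5), ("other", l6)]) c = PySem.Dict.ofList [("content", l1), ("infrastructure", l2), ("bugfixes", l3), ("features", l4), ("documentation", l5 ++ [c]), ("other", l6)] := by
          unfold pvStepA
          simp only [if_neg hc, b1, b2, b3, b4, Bool.false_eq_true, if_false, b5, if_true]
          exact pv_mod_documentation l1 l2 l3 l4 l5 l6 c
        rw [hs, ih]
        simp [pvBucket, hc, hcat]
      simp only [Bool.not_eq_true] at b5
      have hcat : pvCategory c = "other" := by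
        unfold pvCategory pvRules
        rw [List.find?_cons_of_neg (by simp only [b1]; exact Bool.false_ne_true), List.find?_cons_of_neg (by simp only [b2]; exact Bool.false_ne_true), List.find?_cons_of_neg (by simp only [b3]; exact Bool.false_ne_true), List.find?_cons_of_neg (by simp only [b4]; exact Bool.false_ne_true), List.find?_cons_of_neg (by simp only [b5]; exact Bool.false_ne_true), List.find?_nil]
      have hs : pvStepA (PySem.Dict.ofList [("content", l1), ("infrastructure", l2), ("bugfixes", l3), ("features", l4), ("documentation", l5), ("other", l6)]) c = PySem.Dict.ofList [("content", l1), ("infrastructure", l2), ("bugfixes", l3), ("features", l4), ("documentation", l5), ("other", l6 ++ [c])] := by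
        unfold pvStepA
        simp only [if_neg hc, b1, b2, b3, b4, b5, Bool.false_eq_true, if_false]
        exact pv_mod_other l1 l2 l3 l4 l5 l6 c
      rw [hs, ih]
      simp [pvBucket, hc, hcat]

-- grouping by per-key filtering over the classified list is the same bucket
theorem pv_bucket_eq (key : String) (commits : List String) :
    ((((commits.filter (fun c => c ≠ "")).map (fun c => (c, pvCategory c))).filter
        (fun p => p.2 == key)).map (fun p => p.1)) = pvBucket key commits := by
  induction commits with
  | nil => rfl
  | cons c rest ih =>
    by_cases hc : c = ""
    · simp [pvBucket, hc] at ih ⊢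
      exact ih
    · by_cases hk : pvCategory c == key
      · simp [pvBucket, hc, hk] at ih ⊢
        exact ih
      · simp only [Bool.not_eq_true] at hk
        simp [pvBucket, hc, hk] at ih ⊢
        exact ih

-- ===== VERDICT (by name: the statement is the Claim_ definition above) =====
theorem analyze_commit_messages_spec : Claim_equal_analyze_commit_messages := by
  intro commits _
  unfold Spec_analyze_commit_messages analyze_commit_messages analyze_commit_messages_alt
  rw [pv_main]
  simp only [pvKeyOrder, List.map_cons, List.map_nil, pv_bucket_eq, List.nil_append]
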